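-- pv_equiv track=rewrite | github.com/pypi-data/pypi-mirror-398 | packages/cloudpss/cloudpss-5.0.0a1-py3-none-any.whl/cloudpss/utils/parseDebugArgs.py | parse_debug_args
-- ===== SOURCE A (Python) =====
-- def parse_debug_args(debug=None):
--     if not debug or not isinstance(debug, str):
--         return None
--
--     tokens = []
--
--     # 1. 先按照非转义的空格拆分字符串，获取每个 token
--     current_token = ''
--     escaping = False  # 表示当前是否在处理转义字符
--
--     for char in debug:
--         if escaping:
--             # 如果上一个字符是 '\'，则把当前字符直接添加到 token，并保留 '\' 以供二阶段使用
--             current_token += '\\' + char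
--             escaping = False
--         elif char == '\\':
--             # 开始转义
--             escaping = True
--         elif char.isspace():
--             # 如果遇到空格 (并且不在转义状态)，说明一个 token 结束
--             if current_token:
--                 tokens.append(current_token)
--                 current_token = ''
--         else:
--             # 普通字符，直接添加
--             current_token += char
--
--     # 最后一个 token 加入数组（如果有的话）
--     if current_token:
--         tokens.append(current_token)
--
--     if not tokens:
--         return None
--
--     # 2. 对每个 token，找第一个非转义的 '=' 分割 key/value
--     entries = []
--
--     for token in tokens:
--         key = ''
--         value = ''
--         has_equal = False
--         escaping = False
--
--         # 我们只需要区分第一处真正的 '='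
--         for char in token:
--             if escaping:
--                 # 处理转义字符
--                 if char == 'b':
--                     escaped_char = '\b'
--                 elif char == 'f':
--                     escaped_char = '\f'
--                 elif char == 'n':
--                     escaped_char = '\n'
--                 elif char == 'r':
--                     escaped_char = '\r'
--                 elif char == 't':
--                     escaped_char = '\t'
--                 elif char == 'v':
--                     escaped_char = '\v'
--                 else:
--                     escaped_char = char
--
--                 # 直接添加当前字符
--                 if not has_equal:
--                     key += escaped_char
--                 else:
--                     if escaped_char in ['\\', '$']:
--                         # 保留转义字符
--                         value += '\\' + escaped_char
--                     else:
--                         value += escaped_char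
--                 escaping = False
--             elif char == '\\':
--                 escaping = True
--             elif char == '=' and not has_equal:
--                 # 遇到第一个非转义的 '=' 时，视为 key/value 分隔
--                 has_equal = True
--             else:
--                 # 普通字符
--                 if not has_equal:
--                     key += char
--                 else:
--                     value += char
--
--         # 添加 key 和 value 到 entries 列表
--         entries.append((key, value))
--
--     return dict(entries)
-- ===== SOURCE B (Python) =====
-- def parse_debug_args(debug=None):
--     if not debug or not isinstance(debug, str):
--         return None
--
--     # Single pass: interpret escapes while scanning, instead of tokenizing then re-parsing.
--     entries = []
--     key = ''
--     value = ''
--     has_equal = False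
--     started = False   # a (possibly empty-key) token is in progress
--     escaping = False
--
--     for char in debug:
--         if escaping:
--             escaped_char = {'b': '\b', 'f': '\f', 'n': '\n',
--                             'r': '\r', 't': '\t', 'v': '\v'}.get(char, char)
--             if not has_equal:
--                 key += escaped_char
--             elif escaped_char in ('\\', '$'):
--                 value += '\\' + escaped_char
--             else:
--                 value += escaped_char
--             started = True
--             escaping = False
--         elif char == '\\':
--             escaping = True
--         elif char.isspace():
--             if started:
--                 entries.append((key, value))
--                 key = ''
--                 value = ''
--                 has_equal = False
--                 started = False
--         elif char == '=' and not has_equal: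
--             has_equal = True
--             started = True
--         else:
--             if not has_equal:
--                 key += char
--             else:
--                 value += char
--             started = True
--
--     if started:
--         entries.append((key, value))
--
--     if not entries:
--         return None
--     return dict(entries)
-- ===== Notes on version B (the rewrite author's own statement) =====
-- stated objective: simpler
-- what changed: Replaces A's two-phase design (tokenize on unescaped spaces while preserving backslashes, then re-scan each token to interpret escapes and split on the first unescaped '=') with a single pass over the string that interprets escapes, splits key/value and finalizes entries on the fly.
import Mathlib
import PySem

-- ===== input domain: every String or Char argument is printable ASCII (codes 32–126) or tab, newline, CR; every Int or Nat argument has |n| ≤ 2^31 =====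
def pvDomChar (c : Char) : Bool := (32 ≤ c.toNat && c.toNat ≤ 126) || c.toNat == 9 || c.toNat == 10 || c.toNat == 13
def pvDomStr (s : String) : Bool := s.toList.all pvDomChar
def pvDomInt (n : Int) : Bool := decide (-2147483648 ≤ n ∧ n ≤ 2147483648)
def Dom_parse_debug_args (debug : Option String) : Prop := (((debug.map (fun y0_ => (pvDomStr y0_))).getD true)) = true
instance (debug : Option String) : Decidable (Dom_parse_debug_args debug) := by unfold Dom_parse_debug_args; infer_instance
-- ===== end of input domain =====

-- B replaces A's two-phase tokenize-then-reparse with a single pass that interprets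
-- escapes while scanning (objective: simpler one-pass decomposition, same cost).


-- ===== PORT A =====

-- phase 1 loop body: state (tokens, current_token, escaping), over List Char
def pvTokStep (st : List (List Char) × List Char × Bool) (c : Char) :
    List (List Char) × List Char × Bool :=
  let (toks, cur, esc) := st
  if esc then (toks, cur ++ ['\\', c], false)
  else if c = '\\' then (toks, cur, true)
  else if PySem.Chars.isspace c then
    (if cur ≠ [] then (toks ++ [cur], [], esc) else (toks, cur, esc))
  else (toks, cur ++ [c], esc)

-- escape-character table of phase 2
def pvEscMap (c : Char) : Char :=
  if c = 'b' then '\x08' else if c = 'f' then '\x0c' else if c = 'n' then '\n'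
  else if c = 'r' then '\r' else if c = 't' then '\t' else if c = 'v' then '\x0b' else c

-- phase 2 loop body: state (key, value, has_equal, escaping)
def pvParseStep (st : List Char × List Char × Bool × Bool) (c : Char) :
    List Char × List Char × Bool × Bool :=
  let (key, val, hq, esc) := st
  if esc then
    let e := pvEscMap c
    if ¬ hq then (key ++ [e], val, hq, false)
    else if e = '\\' ∨ e = '$' then (key, val ++ ['\\', e], hq, false)
    else (key, val ++ [e], hq, false)
  else if c = '\\' then (key, val, hq, true)
  else if c = '=' ∧ ¬ hq then (key, val, true, esc)
  else if ¬ hq then (key ++ [c], val, hq, esc)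
  else (key, val ++ [c], hq, esc)

def pvParseToken (t : List Char) : String × String :=
  let (key, val, _, _) := t.foldl pvParseStep ([], [], false, false)
  (String.ofList key, String.ofList val)

def parse_debug_args (debug : Option String) : Option (List (String × String)) :=
  match debug with
  | none => none
  | some s =>
    if s.toList = [] then none
    else
      let (toks, cur, _) := s.toList.foldl pvTokStep ([], [], false)
      let toks := if cur ≠ [] then toks ++ [cur] else toks
      if toks = [] then none
      else some (PySem.Dict.ofList (toks.map pvParseToken)).items

-- ===== PORT B =====

-- single-pass loop body: state (entries, key, value, has_equal, started, escaping)
def pvAltStep (st : List (String × String) × List Char × List Char × Bool × Bool × Bool)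
    (c : Char) : List (String × String) × List Char × List Char × Bool × Bool × Bool :=
  let (entries, key, val, hq, started, esc) := st
  if esc then
    let e := pvEscMap c
    if ¬ hq then (entries, key ++ [e], val, hq, true, false)
    else if e = '\\' ∨ e = '$' then (entries, key, val ++ ['\\', e], hq, true, false)
    else (entries, key, val ++ [e], hq, true, false)
  else if c = '\\' then (entries, key, val, hq, started, true)
  else if PySem.Chars.isspace c then
    (if started then (entries ++ [(String.ofList key, String.ofList val)], [], [], false, false, esc)
     else (entries, key, val, hq, started, esc))
  else if c = '=' ∧ ¬ hq then (entries, key, val, true, true, esc)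
  else if ¬ hq then (entries, key ++ [c], val, hq, true, esc)
  else (entries, key, val ++ [c], hq, true, esc)

def parse_debug_args_alt (debug : Option String) : Option (List (String × String)) :=
  match debug with
  | none => none
  | some s =>
    if s.toList = [] then none
    else
      let (entries, key, val, _, started, _) :=
        s.toList.foldl pvAltStep ([], [], [], false, false, false)
      let entries := if started then entries ++ [(String.ofList key, String.ofList val)] else entries
      if entries = [] then none
      else some (PySem.Dict.ofList entries).items

-- ===== PRECONDITION & SPEC =====
def Spec_parse_debug_args (debug : Option String) (out : Option (List (String × String))) : Prop := out = parse_debug_args_alt debug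
instance (debug : Option String) (out : Option (List (String × String))) : Decidable (Spec_parse_debug_args debug out) := by unfold Spec_parse_debug_args; infer_instance

-- ===== CLAIM (what is proved, stated in full; the proofs are below) =====
def Claim_equal_parse_debug_args : Prop := ∀ (debug : Option String), Dom_parse_debug_args debug → Spec_parse_debug_args debug (parse_debug_args debug)

-- ===== LEMMAS AND PROOFS =====

-- B's state as a function of A's phase-1 state (entries = per-token parse of done tokens,
-- key/value/has_equal = partial phase-2 parse of the current token, started = token nonempty)
def pvStateOf (st : List (List Char) × List Char × Bool) :
    List (String × String) × List Char × List Char × Bool × Bool × Bool :=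
  let (toks, cur, esc) := st
  let (key, val, hq, _) := cur.foldl pvParseStep ([], [], false, false)
  (toks.map pvParseToken, key, val, hq, decide (cur ≠ []), esc)

-- well-formed current token: its partial phase-2 parse does not end inside an escape
def pvWf (cur : List Char) : Prop :=
  (cur.foldl pvParseStep ([], [], false, false)).2.2.2 = false

theorem pvStep_comm (st : List (List Char) × List Char × Bool) (c : Char)
    (hwf : pvWf st.2.1) :
    pvAltStep (pvStateOf st) c = pvStateOf (pvTokStep st c) ∧ pvWf (pvTokStep st c).2.1 := by
  obtain ⟨toks, cur, esc⟩ := st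
  rcases h : cur.foldl pvParseStep ([], [], false, false) with ⟨k, v, hq, e⟩
  simp only [pvWf, h] at hwf
  subst hwf
  cases esc with
  | true =>
    constructor <;>
      (by_cases hhq : hq = true <;>
        by_cases hd : pvEscMap c = '\\' ∨ pvEscMap c = '$' <;>
        simp [pvStateOf, pvTokStep, pvAltStep, pvWf, List.foldl_append, h, pvParseStep, hhq, hd])
  | false =>
    by_cases hbs : c = '\\'
    · subst hbs
      simp [pvStateOf, pvTokStep, pvAltStep, pvWf, h]
    · by_cases hsp : PySem.Chars.isspace c = true
      · by_cases hcur : cur = []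
        · subst hcur
          simp only [List.foldl] at h
          cases h
          simp [pvStateOf, pvTokStep, pvAltStep, pvWf, hbs, hsp]
        · simp [pvStateOf, pvTokStep, pvAltStep, pvWf, hbs, hsp, hcur, h, pvParseToken]
      · by_cases heq : c = '=' ∧ ¬ hq = true
        · obtain ⟨hc, hq0⟩ := heq
          subst hc
          simp only [Bool.not_eq_true] at hq0
          subst hq0
          simp [pvStateOf, pvTokStep, pvAltStep, pvWf, hbs, hsp, List.foldl_append, h,
            pvParseStep]
        · by_cases hhq : hq = true <;>
            simp_all [pvStateOf, pvTokStep, pvAltStep, pvWf, List.foldl_append, pvParseStep]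

theorem pvFold_comm (cs : List Char) (st : List (List Char) × List Char × Bool)
    (hwf : pvWf st.2.1) :
    cs.foldl pvAltStep (pvStateOf st) = pvStateOf (cs.foldl pvTokStep st) ∧
      pvWf (cs.foldl pvTokStep st).2.1 := by
  induction cs generalizing st with
  | nil => exact ⟨rfl, hwf⟩
  | cons c cs ih =>
    obtain ⟨hc, hw⟩ := pvStep_comm st c hwf
    simpa [List.foldl, hc] using ih (pvTokStep st c) hw

-- ===== VERDICT (by name: the statement is the Claim_ definition above) =====
theorem parse_debug_args_spec : Claim_equal_parse_debug_args := by
  intro debug _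
  unfold Spec_parse_debug_args
  match debug with
  | none => rfl
  | some s =>
    simp only [parse_debug_args, parse_debug_args_alt]
    by_cases hnil : s.toList = []
    · simp [hnil]
    · simp only [hnil]
      have h := pvFold_comm s.toList ([], [], false) (by simp [pvWf])
      have hst : pvStateOf ([], [], false) = ([], [], [], false, false, false) := by
        simp [pvStateOf]
      rw [hst] at h
      rcases hA : s.toList.foldl pvTokStep ([], [], false) with ⟨toks, cur, esc⟩
      rw [hA] at h
      rw [h.1]
      simp only [pvStateOf]
      rcases hP : cur.foldl pvParseStep ([], [], false, false) with ⟨k, v, hq, e⟩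
      by_cases hcur : cur = []
      · subst hcur
        simp only [List.foldl] at hP
        cases hP
        simp
      · simp [hcur, pvParseToken, hP]
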